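-- pv_equiv track=rewrite | github.com/jamesw343/PixMob_IR | scripts/pixmob_ir_protocol.py | _do_ir_encoding
-- ===== SOURCE A (Python) =====
-- COMMAND_HEADER      = 0b10000000
--
-- COMMAND_SIZE_6B     = 6
--
-- COMMAND_SIZE_9B     = 9
--
-- IR_ENCODING_MAP = [
--     0x21, 0x32, 0x54, 0x65, 0xa9, 0x9a, 0x6d, 0x29,
--     0x56, 0x92, 0xa1, 0xb4, 0xb2, 0x84, 0x66, 0x2a,
--     0x4c, 0x6a, 0xa6, 0x95, 0x62, 0x51, 0x42, 0x24,
--     0x35, 0x46, 0x8a, 0xac, 0x8c, 0x6c, 0x2c, 0x4a,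
--     0x59, 0x86, 0xa4, 0xa2, 0x91, 0x64, 0x55, 0x44,
--     0x22, 0x31, 0xb1, 0x52, 0x85, 0x96, 0xa5, 0x69,
--     0x5a, 0x2d, 0x4d, 0x89, 0x45, 0x34, 0x61, 0x25,
--     0x36, 0xad, 0x94, 0xaa, 0x8d, 0x49, 0x99, 0x26,
-- ]
--
-- def _do_ir_encoding(buf):
--     assert len(buf) == COMMAND_SIZE_6B or len(buf) == COMMAND_SIZE_9B
--
--     checksum = 0
--     encoded_bytes = [COMMAND_HEADER, 0] # second value is placeholder for checksum
--     for i in range(2, len(buf)):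
--         b = buf[i]
--         assert b < len(IR_ENCODING_MAP), f"Invalid command byte {hex(b)} at offset {i}"
--         encoded_byte = IR_ENCODING_MAP[b]
--         encoded_bytes.append(encoded_byte)
--         checksum += encoded_byte
--
--     checksum = (checksum >> 2) & 0b111111
--     encoded_bytes[1] = IR_ENCODING_MAP[checksum]
--
--     encoded_bits = []
--     for b in encoded_bytes:
--         for i in range(8):
--             # Don't insert leading 0's
--             if encoded_bits or b & 0b1:
--                 encoded_bits.append(b & 0b1)
--             b >>= 1
--
--     # Delete trailing 0's
--     while encoded_bits[-1] == 0:
--         encoded_bits.pop()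
--
--     return encoded_bits
-- ===== SOURCE B (Python) =====
-- COMMAND_HEADER  = 0b10000000
-- COMMAND_SIZE_6B = 6
-- COMMAND_SIZE_9B = 9
--
-- IR_ENCODING_MAP = [
--     0x21, 0x32, 0x54, 0x65, 0xa9, 0x9a, 0x6d, 0x29,
--     0x56, 0x92, 0xa1, 0xb4, 0xb2, 0x84, 0x66, 0x2a,
--     0x4c, 0x6a, 0xa6, 0x95, 0x62, 0x51, 0x42, 0x24,
--     0x35, 0x46, 0x8a, 0xac, 0x8c, 0x6c, 0x2c, 0x4a,
--     0x59, 0x86, 0xa4, 0xa2, 0x91, 0x64, 0x55, 0x44,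
--     0x22, 0x31, 0xb1, 0x52, 0x85, 0x96, 0xa5, 0x69,
--     0x5a, 0x2d, 0x4d, 0x89, 0x45, 0x34, 0x61, 0x25,
--     0x36, 0xad, 0x94, 0xaa, 0x8d, 0x49, 0x99, 0x26,
-- ]
--
-- def _do_ir_encoding(buf):
--     assert len(buf) == COMMAND_SIZE_6B or len(buf) == COMMAND_SIZE_9B
--
--     body = []
--     for offset, b in enumerate(buf[2:], start=2):
--         assert b < len(IR_ENCODING_MAP), f"Invalid command byte {hex(b)} at offset {offset}"
--         body.append(IR_ENCODING_MAP[b])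
--
--     checksum = (sum(body) >> 2) & 0b111111
--     encoded_bytes = [COMMAND_HEADER, IR_ENCODING_MAP[checksum]] + body
--
--     # Emit all 8 LSB-first bits of every byte, then trim the leading and
--     # trailing zeros of the whole stream in one slicing step.
--     bits = [(b >> i) & 1 for b in encoded_bytes for i in range(8)]
--     first = bits.index(1)
--     last = len(bits) - 1 - bits[::-1].index(1)
--     return bits[first:last + 1]
-- ===== Notes on version B (the rewrite author's own statement) =====
-- stated objective: alternative
-- what changed: B builds the body and checksum separately (sum of the mapped bytes, no placeholder mutation) and replaces A's in-loop leading-zero suppression plus trailing pop-while by one unconditional 8-bit-per-byte expansion followed by a single slice between the first and last 1 bit.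
import Mathlib
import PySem

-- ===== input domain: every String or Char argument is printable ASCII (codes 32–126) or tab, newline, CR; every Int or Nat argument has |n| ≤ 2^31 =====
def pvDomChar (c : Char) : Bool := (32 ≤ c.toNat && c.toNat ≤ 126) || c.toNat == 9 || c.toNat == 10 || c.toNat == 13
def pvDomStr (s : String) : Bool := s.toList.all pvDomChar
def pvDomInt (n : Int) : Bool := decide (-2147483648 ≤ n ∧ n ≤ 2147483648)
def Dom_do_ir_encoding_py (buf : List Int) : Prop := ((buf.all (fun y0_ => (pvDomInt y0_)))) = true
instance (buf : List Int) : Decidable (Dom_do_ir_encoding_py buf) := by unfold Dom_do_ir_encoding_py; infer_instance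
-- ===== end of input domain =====

-- B restructures A's bit emission: it expands every byte to all 8 LSB-first bits and then
-- trims leading/trailing zeros with one slice, instead of suppressing leading zeros inside
-- the loop and popping trailing zeros afterwards; the body/checksum pass is also decomposed
-- (sum after mapping, no placeholder mutation). Same cost; objective: alternative.

-- IR_ENCODING_MAP (module constant shared by both Pythons)
def irMap : List Int := [
  0x21, 0x32, 0x54, 0x65, 0xa9, 0x9a, 0x6d, 0x29,
  0x56, 0x92, 0xa1, 0xb4, 0xb2, 0x84, 0x66, 0x2a,
  0x4c, 0x6a, 0xa6, 0x95, 0x62, 0x51, 0x42, 0x24,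
  0x35, 0x46, 0x8a, 0xac, 0x8c, 0x6c, 0x2c, 0x4a,
  0x59, 0x86, 0xa4, 0xa2, 0x91, 0x64, 0x55, 0x44,
  0x22, 0x31, 0xb1, 0x52, 0x85, 0x96, 0xa5, 0x69,
  0x5a, 0x2d, 0x4d, 0x89, 0x45, 0x34, 0x61, 0x25,
  0x36, 0xad, 0x94, 0xaa, 0x8d, 0x49, 0x99, 0x26]

-- IR_ENCODING_MAP[b] (Python negative-index semantics via pyGet?; within Pre_ the index is in range)
def irEnc (b : Int) : Int := (PySem.List.pyGet? irMap b).getD 0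

-- ===== PORT A =====
-- inner 'for i in range(8)' loop of A with its leading-zero suppression
def bitsLoopA : Int → Nat → List Int → List Int
  | _, 0, acc => acc
  | b, k+1, acc =>
    let acc' := if acc ≠ [] ∨ PySem.Int.band b 1 ≠ 0 then acc ++ [PySem.Int.band b 1] else acc
    bitsLoopA (b >>> (1:Nat)) k acc'

-- 'while encoded_bits[-1] == 0: encoded_bits.pop()', ported over the reversed list
-- (Python would raise IndexError on the empty list; unreachable: the 0x80 header leaves a 1 bit)
def popA : List Int → List Int
  | [] => []
  | x :: r => if x = 0 then popA r else x :: r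

def do_ir_encoding_py (buf : List Int) : List Int :=
  let st := (PySem.List.pyRange 2 (PySem.List.len buf)).foldl
    (fun (st : List Int × Int) i =>
      (st.1 ++ [irEnc (PySem.List.pyGetD buf i 0)], st.2 + irEnc (PySem.List.pyGetD buf i 0)))
    ([128, 0], 0)
  let checksum := PySem.Int.band (st.2 >>> 2) 63
  let encoded := st.1.set 1 (irEnc checksum)
  let bits := encoded.foldl (fun acc b => bitsLoopA b 8 acc) []
  (popA bits.reverse).reverse

-- ===== PORT B =====
-- '[(b >> i) & 1 for i in range(8)]' for one byte
def bits8 (b : Int) : List Int := (List.range 8).map (fun (i : Nat) => PySem.Int.band (b >>> i) 1)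

def do_ir_encoding_py_alt (buf : List Int) : List Int :=
  let body := (PySem.List.slice buf (some 2) none).foldl (fun acc b => acc ++ [irEnc b]) []
  let checksum := PySem.Int.band (body.sum >>> 2) 63
  let encoded := [128, irEnc checksum] ++ body
  let bits := encoded.flatMap bits8
  let first := (PySem.List.index? bits 1).getD 0
  let last : Int := (bits.length : Int) - 1 - ((PySem.List.index? bits.reverse 1).getD 0 : Nat)
  PySem.List.slice bits (some (first : Int)) (some (last + 1))

-- ===== PRECONDITION & SPEC =====
-- Pre_: exactly where the Python A returns normally — the asserted lengths 6 or 9, and every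
-- command byte small enough for the assert (b < 64) and not below -64 (IndexError).
def Pre_do_ir_encoding_py (buf : List Int) : Prop :=
  (buf.length = 6 ∨ buf.length = 9) ∧ ∀ b ∈ buf.drop 2, -(2^6) ≤ b ∧ b < 2^6
instance (buf : List Int) : Decidable (Pre_do_ir_encoding_py buf) := by
  unfold Pre_do_ir_encoding_py; infer_instance

def pvWitness_do_ir_encoding_py : List Int := [0, 0, 1, 2, 3, 4]

def Spec_do_ir_encoding_py (buf : List Int) (out : List Int) : Prop := out = do_ir_encoding_py_alt buf
instance (buf : List Int) (out : List Int) : Decidable (Spec_do_ir_encoding_py buf out) := by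
  unfold Spec_do_ir_encoding_py; infer_instance

-- ===== CLAIM (what is proved, stated in full; the proofs are below) =====
def Claim_equal_do_ir_encoding_py : Prop := ∀ (buf : List Int), Dom_do_ir_encoding_py buf → Pre_do_ir_encoding_py buf → Spec_do_ir_encoding_py buf (do_ir_encoding_py buf)

-- ===== LEMMAS AND PROOFS =====

theorem encfold (l acc : List Int) (s : Int) :
    l.foldl (fun (st : List Int × Int) b => (st.1 ++ [irEnc b], st.2 + irEnc b)) (acc, s)
      = (acc ++ l.map irEnc, s + (l.map irEnc).sum) := by
  induction l generalizing acc s with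
  | nil => simp
  | cons x l ih => simp [ih, add_assoc]

theorem bitsLoopA_ne (k : Nat) (b : Int) (acc : List Int) (h : acc ≠ []) :
    bitsLoopA b k acc = acc ++ (List.range k).map (fun (i : Nat) => PySem.Int.band (b >>> i) 1) := by
  induction k generalizing b acc with
  | zero => simp [bitsLoopA]
  | succ k ih =>
    rw [bitsLoopA, if_pos (Or.inl h), ih _ _ (by simp), List.range_succ_eq_map]
    simp only [List.map_cons, List.map_map, List.append_assoc, List.singleton_append]
    congr 2
    · simp
    · apply List.map_congr_left
      intro i _
      simp only [Function.comp, Nat.succ_eq_add_one]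
      rw [show i + 1 = 1 + i from Nat.add_comm i 1, Int.shiftRight_add]

theorem foldl_bitsLoopA (es acc : List Int) (h : acc ≠ []) :
    es.foldl (fun acc b => bitsLoopA b 8 acc) acc = acc ++ es.flatMap bits8 := by
  induction es generalizing acc with
  | nil => simp
  | cons e es ih =>
    rw [List.foldl_cons, bitsLoopA_ne 8 e acc h, ih _ (by simp [h]), List.flatMap_cons]
    simp [bits8]

theorem popA_eq_dropWhile (l : List Int) : popA l = l.dropWhile (fun x => x == 0) := by
  induction l with
  | nil => rfl
  | cons x r ih =>
    by_cases h : x = 0 <;> simp [popA, h, ih]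

theorem mem_bits8 (b x : Int) (h : x ∈ bits8 b) : x = 0 ∨ x = 1 := by
  simp [bits8] at h
  obtain ⟨i, _, rfl⟩ := h
  rw [PySem.Int.band_one]
  have h1 := PySem.Int.mod_nonneg (b >>> i) (by norm_num : (0:Int) < 2)
  have h2 := PySem.Int.mod_lt (b >>> i) (by norm_num : (0:Int) < 2)
  omega

theorem idxOf?_zeros_one (r t : List Int) (h : ∀ x ∈ r, x = 0 ∨ x = 1) :
    PySem.List.index? (r ++ 1 :: t) 1 = some (r.takeWhile (fun x => x == 0)).length := by
  induction r with
  | nil =>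
    simp only [PySem.List.index?, List.idxOf?, List.nil_append]
    rw [List.findIdx?_cons]
    norm_num
  | cons x r ih =>
    rcases h x (by simp) with rfl | rfl
    · have hih := ih (fun y hy => h y (by simp [hy]))
      simp only [PySem.List.index?, List.idxOf?] at hih ⊢
      simp only [List.cons_append]
      rw [List.findIdx?_cons]
      norm_num [hih]
    · simp only [List.cons_append]
      simp only [PySem.List.index?, List.idxOf?]
      rw [List.findIdx?_cons]
      norm_num

theorem takeWhile_zeros_append_one (r : List Int) (h : ∀ x ∈ r, x = 0 ∨ x = 1) :
    (r ++ [1]).takeWhile (fun x => x == 0) = r.takeWhile (fun x => x == 0) := by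
  induction r with
  | nil => simp
  | cons x r ih =>
    rcases h x (by simp) with rfl | rfl
    · simp [ih (fun y hy => h y (by simp [hy]))]
    · simp

theorem dropWhile_eq_drop_takeWhile (p : Int → Bool) (l : List Int) :
    l.dropWhile p = l.drop (l.takeWhile p).length := by
  induction l with
  | nil => rfl
  | cons x r ih =>
    by_cases h : p x <;> simp [h, ih]

-- the whole bit phase: A's suppress-and-pop equals B's expand-and-slice, for any byte list after the header
theorem bitphase (es : List Int) :
    (popA ((128 :: es).foldl (fun acc b => bitsLoopA b 8 acc) []).reverse).reverse
      = (let bits := (128 :: es).flatMap bits8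
         PySem.List.slice bits (some (((PySem.List.index? bits 1).getD 0 : Nat) : Int))
           (some ((bits.length : Int) - 1 - ((PySem.List.index? bits.reverse 1).getD 0 : Nat) + 1))) := by
  have hmem : ∀ x ∈ es.flatMap bits8, x = 0 ∨ x = 1 := by
    intro x hx
    simp [List.mem_flatMap] at hx
    obtain ⟨b, _, hb⟩ := hx
    exact mem_bits8 b x hb
  set t := es.flatMap bits8 with ht
  set z : Int → Bool := fun x => x == 0 with hz
  have hmemr : ∀ x ∈ t.reverse, x = 0 ∨ x = 1 := fun x hx => hmem x (List.mem_reverse.mp hx)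
  set c := (t.reverse.takeWhile z).length with hc
  have hcn : c ≤ t.length := by
    calc c ≤ t.reverse.length := by rw [hc]; exact (List.takeWhile_sublist _).length_le
    _ = t.length := by simp
  -- A side
  have hA : ((128 :: es).foldl (fun acc b => bitsLoopA b 8 acc) []) = 1 :: t := by
    rw [List.foldl_cons]
    have h128 : bitsLoopA 128 8 [] = [1] := by decide
    rw [h128, foldl_bitsLoopA es [1] (by simp)]
    simp [ht]
  rw [hA]
  have hArev : (1 :: t).reverse = t.reverse ++ [1] := by simp
  rw [hArev, popA_eq_dropWhile, dropWhile_eq_drop_takeWhile,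
      takeWhile_zeros_append_one t.reverse hmemr]
  -- B side
  have hbits : (128 :: es).flatMap bits8 = [0,0,0,0,0,0,0] ++ 1 :: t := by
    rw [List.flatMap_cons, ← ht]
    rfl
  simp only [hbits]
  have hfirst : PySem.List.index? ([0,0,0,0,0,0,0] ++ 1 :: t) 1 = some 7 := by
    rw [idxOf?_zeros_one _ _ (by decide)]; rfl
  have hrev : ([0,0,0,0,0,0,0] ++ 1 :: t : List Int).reverse
      = t.reverse ++ 1 :: [0,0,0,0,0,0,0] := by simp
  have hlast : PySem.List.index? (([0,0,0,0,0,0,0] ++ 1 :: t : List Int)).reverse 1 = some c := by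
    rw [hrev, idxOf?_zeros_one _ _ hmemr]
  rw [hfirst, hlast]
  have hlen : (([0,0,0,0,0,0,0] ++ 1 :: t : List Int)).length = 8 + t.length := by
    simp; omega
  rw [hlen]
  have harith : ((8 + t.length : Nat) : Int) - 1 - (c : Nat) + 1 = ((8 + t.length - c : Nat) : Int) := by
    push_cast; omega
  simp only [Option.getD_some, harith]
  rw [PySem.List.slice_natCast]
  have hdrop : List.drop 7 ([0,0,0,0,0,0,0] ++ 1 :: t : List Int) = 1 :: t := by
    rfl
  rw [hdrop]
  -- both sides are take (t.length + 1 - c) (1 :: t)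
  have : (List.drop c (t.reverse ++ [1])).reverse = List.take (t.length + 1 - c) (1 :: t) := by
    rw [List.reverse_drop]
    have h1 : (t.reverse ++ [1]).reverse = 1 :: t := by simp
    have h2 : (t.reverse ++ [1]).length = t.length + 1 := by simp
    rw [h1, h2]
  rw [this]
  congr 1
  omega

-- ===== VERDICT (by name: the statement is the Claim_ definition above) =====
theorem do_ir_encoding_py_spec : Claim_equal_do_ir_encoding_py := by
  intro buf _ _
  unfold Spec_do_ir_encoding_py do_ir_encoding_py do_ir_encoding_py_alt
  have hlen : PySem.List.len buf = (buf.length : Int) := rfl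
  rw [hlen]
  rw [show ((buf.length : Nat) : Int) = PySem.List.len buf from rfl]
  rw [PySem.List.foldl_pyRange_pyGetD buf 0
    (fun (st : List Int × Int) b => (st.1 ++ [irEnc b], st.2 + irEnc b)) ([128,0], 0)
    (by norm_num : (0:Int) ≤ 2)]
  rw [encfold]
  rw [PySem.List.slice_from buf (by norm_num : (0:Int) ≤ 2)]
  rw [PySem.List.foldl_append_singleton_eq_map irEnc]
  simp only [List.nil_append, zero_add, show ((2:Int)).toNat = 2 from rfl]
  set L := (buf.drop 2).map irEnc with hL
  have hset : ([128, 0] ++ L).set 1 (irEnc (PySem.Int.band (L.sum >>> 2) 63))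
      = [128, irEnc (PySem.Int.band (L.sum >>> 2) 63)] ++ L := by
    simp [List.set]
  rw [hset]
  exact bitphase (irEnc (PySem.Int.band (L.sum >>> 2) 63) :: L)
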